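-- pv_equiv track=rewrite | github.com/open-mmlab/mmaction2 | projects/videochat/models/centernet/modeling/debug.py | _ind2il
-- ===== SOURCE A (Python) =====
-- def _ind2il(ind, shapes_per_level, N):
--     r = ind
--     ll = 0
--     S = 0
--     while r - S >= N * shapes_per_level[ll][0] * shapes_per_level[ll][1]:
--         S += N * shapes_per_level[ll][0] * shapes_per_level[ll][1]
--         ll += 1
--     i = (r - S) // (shapes_per_level[ll][0] * shapes_per_level[ll][1])
--     return i, ll
-- ===== SOURCE B (Python) =====
-- def _ind2il(ind, shapes_per_level, N):
--     cums = []
--     t = 0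
--     for h, w in shapes_per_level:
--         t += N * h * w
--         cums.append(t)
--     ll = 0
--     while cums[ll] <= ind:
--         ll += 1
--     h, w = shapes_per_level[ll]
--     S = cums[ll] - N * h * w
--     return (ind - S) // (h * w), ll
-- ===== Notes on version B (the rewrite author's own statement) =====
-- stated objective: alternative
-- what changed: A's single while-loop that interleaves accumulating the running offset S with the termination test is replaced by a precomputed prefix-sum table, an index-only search for the first prefix sum exceeding ind, and arithmetic recovery of the level offset from the table entry.
import Mathlib
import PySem

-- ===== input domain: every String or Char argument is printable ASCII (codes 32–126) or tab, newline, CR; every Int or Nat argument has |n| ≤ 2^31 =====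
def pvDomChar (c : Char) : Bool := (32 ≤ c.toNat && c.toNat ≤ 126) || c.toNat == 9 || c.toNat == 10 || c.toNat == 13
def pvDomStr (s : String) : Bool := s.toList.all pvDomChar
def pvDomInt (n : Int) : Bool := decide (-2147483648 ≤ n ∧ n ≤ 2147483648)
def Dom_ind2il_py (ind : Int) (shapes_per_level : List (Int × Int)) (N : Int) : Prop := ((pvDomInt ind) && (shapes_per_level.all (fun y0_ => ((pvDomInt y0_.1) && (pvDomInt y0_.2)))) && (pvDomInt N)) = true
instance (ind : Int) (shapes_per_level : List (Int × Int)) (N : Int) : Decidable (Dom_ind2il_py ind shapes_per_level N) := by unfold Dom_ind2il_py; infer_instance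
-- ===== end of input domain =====

-- B replaces A's single while-loop (which accumulates the running offset S while testing the
-- loop bound) by a precomputed prefix-sum table, an index-only search for the first prefix sum
-- exceeding ind, and arithmetic recovery of the offset from the table (return value only).

-- ===== PORT A =====
-- A's while-loop: scans levels, accumulating S and ll, then divides.
-- The [] case is Python's IndexError (the loop ran past the last level); excluded by Pre_.
def aGo (r N : Int) (S ll : Int) : List (Int × Int) → Int × Int
  | [] => (0, ll)
  | (h, w) :: rest =>
    if r - S ≥ N * h * w then aGo r N (S + N * h * w) (ll + 1) rest
    else (PySem.Int.floordiv (r - S) (h * w), ll)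

def ind2il_py (ind : Int) (shapes_per_level : List (Int × Int)) (N : Int) : Int × Int :=
  aGo ind N 0 0 shapes_per_level

-- ===== PORT B =====
-- prefix sums cums[k] = Σ_{j ≤ k} N*h_j*w_j, built in one pass (Source B's first loop)
def bCums (N : Int) : List (Int × Int) → Int → List Int
  | [], _ => []
  | (h, w) :: rest, t => (t + N * h * w) :: bCums N rest (t + N * h * w)

-- Source B's search loop 'while cums[ll] <= ind: ll += 1' over the suffix of cums from ll on;
-- running off the end is Python's IndexError (excluded by Pre_)
def bFind (ind : Int) : List Int → Nat → Nat
  | [], ll => ll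
  | c :: rest, ll => if c ≤ ind then bFind ind rest (ll + 1) else ll

-- the getD defaults are Python's IndexError (ll = len), excluded by Pre_
def ind2il_py_alt (ind : Int) (shapes_per_level : List (Int × Int)) (N : Int) : Int × Int :=
  let cums := bCums N shapes_per_level 0
  let ll := bFind ind cums 0
  let hw := shapes_per_level.getD ll (0, 0)
  let S := cums.getD ll 0 - N * hw.1 * hw.2
  (PySem.Int.floordiv (ind - S) (hw.1 * hw.2), (ll : Int))

-- ===== PRECONDITION & SPEC =====
-- Pre_ excludes exactly the inputs on which A raises: those where no level's cumulative
-- flattened size N*Σ_{j≤k} h_j*w_j exceeds ind (the loop runs past the last level —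
-- IndexError, including the empty list), and those where the first level whose cumulative
-- size exceeds ind has zero area h_k*w_k (ZeroDivisionError).
def Pre_ind2il_py (ind : Int) (shapes_per_level : List (Int × Int)) (N : Int) : Prop :=
  ∃ k, k < shapes_per_level.length ∧
    (∀ j, j < k → N * ((shapes_per_level.take (j + 1)).map (fun p => p.1 * p.2)).sum ≤ ind) ∧
    ind < N * ((shapes_per_level.take (k + 1)).map (fun p => p.1 * p.2)).sum ∧
    (shapes_per_level.getD k (0, 0)).1 * (shapes_per_level.getD k (0, 0)).2 ≠ 0
instance (ind : Int) (shapes_per_level : List (Int × Int)) (N : Int) : Decidable (Pre_ind2il_py ind shapes_per_level N) := by unfold Pre_ind2il_py; infer_instance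

def pvWitness_ind2il_py : Int × (List (Int × Int)) × Int := (3, [(2, 2), (1, 1)], 1)

def Spec_ind2il_py (ind : Int) (shapes_per_level : List (Int × Int)) (N : Int) (out : Int × Int) : Prop := out = ind2il_py_alt ind shapes_per_level N
instance (ind : Int) (shapes_per_level : List (Int × Int)) (N : Int) (out : Int × Int) : Decidable (Spec_ind2il_py ind shapes_per_level N out) := by unfold Spec_ind2il_py; infer_instance

-- ===== CLAIM (what is proved, stated in full; the proofs are below) =====
def Claim_equal_ind2il_py : Prop := ∀ (ind : Int) (shapes_per_level : List (Int × Int)) (N : Int), Dom_ind2il_py ind shapes_per_level N → Pre_ind2il_py ind shapes_per_level N → Spec_ind2il_py ind shapes_per_level N (ind2il_py ind shapes_per_level N)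

-- ===== LEMMAS AND PROOFS =====

-- first-crossing index: the number of leading prefix sums ≤ ind (proof-only reference)
def linIdx (ind : Int) : List Int → Nat
  | [] => 0
  | c :: rest => if c ≤ ind then linIdx ind rest + 1 else 0

theorem bCums_length (N : Int) (shapes : List (Int × Int)) (t : Int) :
    (bCums N shapes t).length = shapes.length := by
  induction shapes generalizing t with
  | nil => simp [bCums]
  | cons p rest ih => simp [bCums, ih]

theorem bFind_eq (ind : Int) (cs : List Int) :
    ∀ ll, bFind ind cs ll = ll + linIdx ind cs := by
  induction cs with
  | nil => intro ll; simp [bFind, linIdx]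
  | cons c rest ih =>
    intro ll
    simp only [bFind, linIdx]
    split
    · rw [ih]; omega
    · omega

theorem linIdx_before (ind : Int) (cs : List Int) :
    ∀ i, i < linIdx ind cs → cs.getD i 0 ≤ ind := by
  induction cs with
  | nil => simp [linIdx]
  | cons c rest ih =>
    intro i hi
    simp only [linIdx] at hi
    split at hi
    · cases i with
      | zero => simpa
      | succ j => simpa using ih j (by omega)
    · omega

theorem linIdx_stop (ind : Int) (cs : List Int) :
    linIdx ind cs < cs.length → ind < cs.getD (linIdx ind cs) 0 := by
  induction cs with
  | nil => simp [linIdx]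
  | cons c rest ih =>
    simp only [linIdx, List.length_cons]
    split
    · intro h
      simpa using ih (by omega)
    · intro _
      simp only [List.getD_cons_zero]
      omega

-- the first-crossing index is determined by its two defining properties
theorem linIdx_unique (ind : Int) (cs : List Int) (k : Nat) (hk : k < cs.length)
    (hbefore : ∀ j, j < k → cs.getD j 0 ≤ ind) (hstop : ind < cs.getD k 0) :
    linIdx ind cs = k := by
  rcases lt_trichotomy (linIdx ind cs) k with h | h | h
  · exfalso
    have h1 : ind < cs.getD (linIdx ind cs) 0 := linIdx_stop ind cs (by omega)
    have h2 : cs.getD (linIdx ind cs) 0 ≤ ind := hbefore _ h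
    omega
  · exact h
  · exfalso
    have h2 : cs.getD k 0 ≤ ind := linIdx_before ind cs k h
    omega

-- A's loop equals the first-crossing characterisation (any signs)
theorem aGo_eq (ind N : Int) :
    ∀ (shapes : List (Int × Int)) (S ll : Int),
      linIdx ind (bCums N shapes S) < shapes.length →
      aGo ind N S ll shapes =
        (PySem.Int.floordiv
            (ind - (if 0 < linIdx ind (bCums N shapes S)
                    then (bCums N shapes S).getD (linIdx ind (bCums N shapes S) - 1) 0 else S))
            ((shapes.getD (linIdx ind (bCums N shapes S)) (0, 0)).1 *
             (shapes.getD (linIdx ind (bCums N shapes S)) (0, 0)).2),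
         ll + (linIdx ind (bCums N shapes S) : Int)) := by
  intro shapes
  induction shapes with
  | nil => intro S ll h; simp at h
  | cons p rest ih =>
    intro S ll h
    obtain ⟨hh, hw⟩ := p
    by_cases hc : S + N * hh * hw ≤ ind
    · have hcond : ind - S ≥ N * hh * hw := by omega
      have hk : linIdx ind (bCums N ((hh, hw) :: rest) S)
          = linIdx ind (bCums N rest (S + N * hh * hw)) + 1 := by
        simp [bCums, linIdx, hc]
      have hlt : linIdx ind (bCums N rest (S + N * hh * hw)) < rest.length := by
        simp only [List.length_cons] at h; omega
      have := ih (S + N * hh * hw) (ll + 1) hlt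
      rw [show aGo ind N S ll ((hh, hw) :: rest)
            = aGo ind N (S + N * hh * hw) (ll + 1) rest by
          simp [aGo, hcond], this, hk]
      set k' := linIdx ind (bCums N rest (S + N * hh * hw)) with hk'
      have hgetS : (bCums N ((hh, hw) :: rest) S).getD (k' + 1 - 1) 0
          = (if 0 < k' then (bCums N rest (S + N * hh * hw)).getD (k' - 1) 0
             else S + N * hh * hw) := by
        cases k'' : k' with
        | zero => simp [bCums]
        | succ m => simp [bCums]
      have hgetP : (((hh, hw) :: rest).getD (k' + 1) (0, 0)) = rest.getD k' (0, 0) := by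
        simp
      rw [if_pos (Nat.succ_pos k'), hgetS, hgetP]
      refine Prod.ext rfl ?_
      push_cast; ring
    · have hcond : ¬ (ind - S ≥ N * hh * hw) := by omega
      have hk : linIdx ind (bCums N ((hh, hw) :: rest) S) = 0 := by
        simp only [bCums, linIdx]
        rw [if_neg (by omega)]
      rw [hk]
      simp [aGo, hcond]

-- the k-th prefix sum in closed form (the expression Pre_ is written with)
theorem bCums_getD (N : Int) :
    ∀ (shapes : List (Int × Int)) (t : Int) (k : Nat), k < shapes.length →
      (bCums N shapes t).getD k 0
        = t + N * ((shapes.take (k + 1)).map (fun p => p.1 * p.2)).sum := by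
  intro shapes
  induction shapes with
  | nil => intro t k hk; simp at hk
  | cons p rest ih =>
    intro t k hk
    obtain ⟨hh, hw⟩ := p
    cases k with
    | zero => simp [bCums]; ring
    | succ k' =>
      simp only [bCums, List.getD_cons_succ, List.take_succ_cons, List.map_cons,
        List.sum_cons]
      rw [ih (t + N * hh * hw) k' (by simpa using hk)]
      ring

-- one step of the prefix-sum table: cums[k] = cums[k-1] + N*h_k*w_k (with base t at k = 0)
theorem bCums_step (N : Int) :
    ∀ (shapes : List (Int × Int)) (t : Int) (k : Nat), k < shapes.length →
      (bCums N shapes t).getD k 0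
        = (if 0 < k then (bCums N shapes t).getD (k - 1) 0 else t)
          + N * (shapes.getD k (0, 0)).1 * (shapes.getD k (0, 0)).2 := by
  intro shapes
  induction shapes with
  | nil => intro t k hk; simp at hk
  | cons p rest ih =>
    intro t k hk
    obtain ⟨hh, hw⟩ := p
    cases k with
    | zero => simp [bCums]
    | succ k' =>
      have hk' : k' < rest.length := by simpa using hk
      simp only [bCums, List.getD_cons_succ]
      rw [ih (t + N * hh * hw) k' hk']
      cases hkk : k' with
      | zero => simp
      | succ m => simp

-- ===== VERDICT (by name: the statement is the Claim_ definition above) =====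
theorem ind2il_py_spec : Claim_equal_ind2il_py := by
  intro ind shapes N _ hpre
  obtain ⟨k, hk, hbefore, hstop, hdiv⟩ := hpre
  have hlen := bCums_length N shapes 0
  have hlin : linIdx ind (bCums N shapes 0) = k := by
    apply linIdx_unique ind (bCums N shapes 0) k (by omega)
    · intro j hj
      rw [bCums_getD N shapes 0 j (by omega)]
      have := hbefore j hj
      omega
    · rw [bCums_getD N shapes 0 k hk]
      omega
  show ind2il_py ind shapes N = ind2il_py_alt ind shapes N
  rw [show ind2il_py ind shapes N = aGo ind N 0 0 shapes from rfl]
  rw [aGo_eq ind N shapes 0 0 (by omega)]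
  simp only [ind2il_py_alt, bFind_eq, Nat.zero_add, hlin]
  have hS : (bCums N shapes 0).getD k 0
        - N * (shapes.getD k (0, 0)).1 * (shapes.getD k (0, 0)).2
      = (if 0 < k then (bCums N shapes 0).getD (k - 1) 0 else 0) := by
    rw [bCums_step N shapes 0 k hk]
    ring
  rw [hS]
  simp
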